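-- pv_equiv track=rewrite | github.com/giammarcoPiccoliExt/multilanguage_base_documentation | preConfiguration/translation/translate_markdown.py | normalize_headings_outside_admonitions
-- ===== SOURCE A (Python) =====
-- def normalize_headings_outside_admonitions(text: str) -> str:
--     lines = text.split('\n')
--     i = 0
--     while i < len(lines):
--         l = lines[i]
--         if l.startswith('    #'):
--             # unindent the heading
--             lines[i] = l[4:]
--             j = i + 1
--             while j < len(lines):
--                 nxt = lines[j]
--                 if not nxt.strip():
--                     break
--                 # stop if next is an admonition or already a heading at column 0 or a code fence
--                 if nxt.startswith('!!! ') or nxt.startswith('#') or nxt.startswith('    ```'):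
--                     break
--                 if nxt.startswith('    ') and not nxt.startswith('    ```'):
--                     lines[j] = nxt[4:]
--                     j += 1
--                     continue
--                 break
--             i = j
--             continue
--         i += 1
--     return '\n'.join(lines)
-- ===== SOURCE B (Python) =====
-- def normalize_headings_outside_admonitions(text: str) -> str:
--     # Staged computation: first a scan that labels every line with a dedent flag
--     # (one unified continuation predicate instead of A's ordered break tests),
--     # then a comprehension that dedents exactly the flagged lines.
--     lines = text.split('\n')
--
--     def dedentable(l):
--         # continues a dedent run: indented, not a code fence, not blank
--         return l.startswith('    ') and not l.startswith('    ```') and l.strip() != ''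
--
--     flags = []
--     prev = False
--     for l in lines:
--         prev = dedentable(l) if prev else l.startswith('    #')
--         flags.append(prev)
--     return '\n'.join(l[4:] if f else l for l, f in zip(lines, flags))
-- ===== Notes on version B (the rewrite author's own statement) =====
-- stated objective: alternative
-- what changed: Replaced A's nested while-loops with index jumping and in-place mutation by two staged passes: a scan that labels each line with a dedent flag using one unified continuation predicate (indented, not a fence, not blank) in place of A's ordered break tests, then a zip comprehension that dedents the flagged lines.
import Mathlib
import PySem

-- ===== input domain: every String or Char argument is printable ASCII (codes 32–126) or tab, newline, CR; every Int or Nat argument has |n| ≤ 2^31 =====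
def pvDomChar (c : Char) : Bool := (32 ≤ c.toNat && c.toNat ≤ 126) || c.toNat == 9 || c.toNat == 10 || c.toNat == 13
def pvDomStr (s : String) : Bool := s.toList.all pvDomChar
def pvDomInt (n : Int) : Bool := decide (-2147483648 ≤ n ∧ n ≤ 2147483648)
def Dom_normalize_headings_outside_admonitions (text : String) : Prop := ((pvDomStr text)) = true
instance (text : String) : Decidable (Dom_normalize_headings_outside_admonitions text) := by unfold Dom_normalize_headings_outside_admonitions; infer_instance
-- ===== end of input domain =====

-- B replaces A's nested while-loops (index jumps, in-place mutation) by two staged passes: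
-- a flag-labelling scan with one unified continuation predicate, then a zip comprehension
-- dedenting the flagged lines (objective: alternative; same return value).

-- ===== PORT A =====
-- l[4:]
def pvDrop4 (l : String) : String := PySem.Str.slice l (some 4) none

-- A's inner while loop over j (fuel = a bound on the remaining iterations, for totality;
-- lines.length - j always suffices): returns (mutated lines, final j)
def pvInnerA (fuel : Nat) (lines : List String) (j : Nat) : List String × Nat :=
  match fuel with
  | 0 => (lines, j)
  | fuel + 1 =>
    if _h : j < lines.length then
      let nxt := lines[j]
      if PySem.Str.strip nxt = "" then (lines, j)
      else if PySem.Str.startswith nxt "!!! " || PySem.Str.startswith nxt "#" || PySem.Str.startswith nxt "    ```" then (lines, j)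
      else if PySem.Str.startswith nxt "    " && !(PySem.Str.startswith nxt "    ```") then
        pvInnerA fuel (lines.set j (pvDrop4 nxt)) (j + 1)
      else (lines, j)
    else (lines, j)

-- A's outer while loop over i (fuel likewise bounds the remaining iterations)
def pvOuterA (fuel : Nat) (lines : List String) (i : Nat) : List String :=
  match fuel with
  | 0 => lines
  | fuel + 1 =>
    if _h : i < lines.length then
      let l := lines[i]
      if PySem.Str.startswith l "    #" then
        let r := pvInnerA lines.length (lines.set i (pvDrop4 l)) (i + 1)
        pvOuterA fuel r.1 r.2
      else
        pvOuterA fuel lines (i + 1)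
    else lines

-- text.split('\n'): the separator is the non-empty literal "\n", so split? is always `some`
def normalize_headings_outside_admonitions (text : String) : String :=
  PySem.Str.join "\n"
    (pvOuterA ((PySem.Str.split? text "\n").getD []).length ((PySem.Str.split? text "\n").getD []) 0)

-- ===== PORT B =====
-- Source B's `dedentable`: continues a dedent run (indented, not a code fence, not blank)
def pvDedentable (l : String) : Bool :=
  PySem.Str.startswith l "    " && !(PySem.Str.startswith l "    ```") && !(PySem.Str.strip l == "")

-- Source B's flag-labelling scan: loop over the lines carrying `prev`, appending one flag per line
def pvFlagsB (prev : Bool) (lines : List String) : List Bool :=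
  match lines with
  | [] => []
  | l :: rest =>
    let f := if prev then pvDedentable l else PySem.Str.startswith l "    #"
    f :: pvFlagsB f rest

-- Source B's final zip comprehension
def normalize_headings_outside_admonitions_alt (text : String) : String :=
  let lines := (PySem.Str.split? text "\n").getD []
  PySem.Str.join "\n" (List.zipWith (fun l f => if f then pvDrop4 l else l) lines (pvFlagsB false lines))

-- ===== PRECONDITION & SPEC =====
def Spec_normalize_headings_outside_admonitions (text : String) (out : String) : Prop := out = normalize_headings_outside_admonitions_alt text
instance (text : String) (out : String) : Decidable (Spec_normalize_headings_outside_admonitions text out) := by unfold Spec_normalize_headings_outside_admonitions; infer_instance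

-- ===== CLAIM (what is proved, stated in full; the proofs are below) =====
def Claim_equal_normalize_headings_outside_admonitions : Prop := ∀ (text : String), Dom_normalize_headings_outside_admonitions text → Spec_normalize_headings_outside_admonitions text (normalize_headings_outside_admonitions text)

-- ===== LEMMAS AND PROOFS =====

-- A's line transformation, written as a recursion over the remaining lines and the flag
def pvGoB : Bool → List String → List String
  | _, [] => []
  | true, l :: rest =>
      if PySem.Str.strip l = "" then l :: pvGoB false rest
      else if PySem.Str.startswith l "!!! " || PySem.Str.startswith l "#" || PySem.Str.startswith l "    ```" then l :: pvGoB false rest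
      else if PySem.Str.startswith l "    " then pvDrop4 l :: pvGoB true rest
      else l :: pvGoB false rest
  | false, l :: rest =>
      if PySem.Str.startswith l "    #" then pvDrop4 l :: pvGoB true rest
      else l :: pvGoB false rest

theorem pvPrefix_decomp (l p : String) (h : PySem.Str.startswith l p = true) :
    ∃ t, l.toList = p.toList ++ t := by
  rw [PySem.Str.startswith_eq] at h
  obtain ⟨t, ht⟩ := List.isPrefixOf_iff_prefix.mp h
  exact ⟨t, ht.symm⟩

theorem pvStrip_eq_nil_all_space (cs : List Char) (h : PySem.Chars.strip cs = []) :
    ∀ c ∈ cs, PySem.Chars.isspace c := by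
  unfold PySem.Chars.strip PySem.Chars.rstrip PySem.Chars.lstrip at h
  have h1 : List.dropWhile PySem.Chars.isspace ((List.dropWhile PySem.Chars.isspace cs).reverse) = [] := by
    simpa using congrArg List.reverse h
  have h2 := List.dropWhile_eq_nil_iff.mp h1
  intro c hc
  rw [← List.takeWhile_append_dropWhile (p := PySem.Chars.isspace) (l := cs)] at hc
  rcases List.mem_append.mp hc with h3 | h3
  · exact List.mem_takeWhile_imp h3
  · exact h2 c (List.mem_reverse.mpr h3)

theorem pvNot_hash (l : String)
    (h : PySem.Str.strip l = "" ∨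
      (PySem.Str.startswith l "!!! " || PySem.Str.startswith l "#" || PySem.Str.startswith l "    ```") = true ∨
      PySem.Str.startswith l "    " = false) :
    PySem.Str.startswith l "    #" = false := by
  by_contra hne
  have hs : PySem.Str.startswith l "    #" = true := by
    cases hb : PySem.Str.startswith l "    #" <;> simp_all
  obtain ⟨t, ht⟩ := pvPrefix_decomp l "    #" hs
  rcases h with h | h | h
  · have h0 : PySem.Chars.strip l.toList = [] := by
      have := congrArg String.toList h
      simpa using this
    have := pvStrip_eq_nil_all_space l.toList h0 '#' (by rw [ht]; simp)
    simp [PySem.Chars.isspace] at this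
  · rw [PySem.Str.startswith_eq, PySem.Str.startswith_eq, PySem.Str.startswith_eq, ht] at h
    simp [PySem.Chars.startswith, List.isPrefixOf] at h
  · rw [PySem.Str.startswith_eq, ht] at h
    simp [PySem.Chars.startswith, List.isPrefixOf] at h

theorem pvGoB_break (l : String) (rest : List String)
    (h : PySem.Str.strip l = "" ∨
      (PySem.Str.startswith l "!!! " || PySem.Str.startswith l "#" || PySem.Str.startswith l "    ```") = true ∨
      PySem.Str.startswith l "    " = false) :
    pvGoB true (l :: rest) = pvGoB false (l :: rest) := by
  have hns := pvNot_hash l h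
  simp only [pvGoB, hns, Bool.false_eq_true, if_false]
  split_ifs with g1 g2 g3
  · rfl
  · rfl
  · rcases h with h | h | h
    · exact absurd h g1
    · exact absurd h g2
    · rw [h] at g3; exact absurd g3 (by simp)
  · rfl

theorem pvTake_set_self {α : Type} (l : List α) (i : Nat) (a : α) :
    (l.set i a).take i = l.take i := by
  rw [List.take_set]
  exact List.set_eq_of_length_le (by simp)

theorem pvTake_succ_set_self {α : Type} (l : List α) (i : Nat) (a : α) (h : i < l.length) :
    (l.set i a).take (i + 1) = l.take i ++ [a] := by
  rw [List.take_set, List.set_eq_take_append_cons_drop]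
  simp [List.take_take, h]

theorem pvInnerA_fst_length (fuel : Nat) : ∀ (lines : List String) (j : Nat),
    ((pvInnerA fuel lines j).1).length = lines.length := by
  induction fuel with
  | zero => intro lines j; rfl
  | succ fuel ih =>
    intro lines j
    simp only [pvInnerA]
    split_ifs <;> simp [ih]

theorem pvInnerA_le_snd (fuel : Nat) : ∀ (lines : List String) (j : Nat),
    j ≤ (pvInnerA fuel lines j).2 := by
  induction fuel with
  | zero => intro lines j; exact Nat.le_refl j
  | succ fuel ih =>
    intro lines j
    simp only [pvInnerA]
    split_ifs
    · exact Nat.le_refl j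
    · exact Nat.le_refl j
    · exact Nat.le_trans (Nat.le_succ j) (ih _ (j + 1))
    · exact Nat.le_refl j
    · exact Nat.le_refl j

theorem pvInnerA_spec (fuel : Nat) : ∀ (lines : List String) (j : Nat),
    j ≤ lines.length → lines.length - j ≤ fuel →
    (pvInnerA fuel lines j).1.take j = lines.take j ∧
    (pvInnerA fuel lines j).2 ≤ lines.length ∧
    (pvInnerA fuel lines j).1.drop (pvInnerA fuel lines j).2 = lines.drop (pvInnerA fuel lines j).2 ∧
    pvGoB true (lines.drop j) =
      ((pvInnerA fuel lines j).1.drop j).take ((pvInnerA fuel lines j).2 - j) ++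
        pvGoB false (lines.drop (pvInnerA fuel lines j).2) := by
  induction fuel with
  | zero =>
    intro lines j hj hf
    have hres : pvInnerA 0 lines j = (lines, j) := rfl
    rw [hres]
    refine ⟨rfl, hj, rfl, ?_⟩
    rw [List.drop_eq_nil_of_le (by omega)]
    simp [pvGoB]
  | succ fuel ih =>
    intro lines j hj hf
    by_cases h : j < lines.length
    · by_cases h1 : PySem.Str.strip (lines[j]'h) = ""
      · have hres : pvInnerA (fuel + 1) lines j = (lines, j) := by
          simp [pvInnerA, h, h1]
        rw [hres]
        refine ⟨rfl, le_of_lt h, rfl, ?_⟩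
        simp only [Nat.sub_self, List.take_zero, List.nil_append]
        rw [← List.getElem_cons_drop h]
        exact pvGoB_break _ _ (Or.inl h1)
      · by_cases h2 : (PySem.Str.startswith (lines[j]'h) "!!! " || PySem.Str.startswith (lines[j]'h) "#" || PySem.Str.startswith (lines[j]'h) "    ```") = true
        · have hres : pvInnerA (fuel + 1) lines j = (lines, j) := by
            simp only [pvInnerA, dif_pos h]
            rw [if_neg h1, if_pos h2]
          rw [hres]
          refine ⟨rfl, le_of_lt h, rfl, ?_⟩
          simp only [Nat.sub_self, List.take_zero, List.nil_append]
          rw [← List.getElem_cons_drop h]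
          exact pvGoB_break _ _ (Or.inr (Or.inl h2))
        · by_cases h3 : (PySem.Str.startswith (lines[j]'h) "    " && !(PySem.Str.startswith (lines[j]'h) "    ```")) = true
          · have hres : pvInnerA (fuel + 1) lines j
                = pvInnerA fuel (lines.set j (pvDrop4 (lines[j]'h))) (j + 1) := by
              simp only [pvInnerA, dif_pos h]
              rw [if_neg h1, if_neg h2, if_pos h3]
            rw [hres]
            obtain ⟨ih1, ih2, ih3, ih4⟩ := ih (lines.set j (pvDrop4 (lines[j]'h))) (j + 1)
              (by simp only [List.length_set]; omega) (by simp only [List.length_set]; omega)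
            have hle := pvInnerA_le_snd fuel (lines.set j (pvDrop4 (lines[j]'h))) (j + 1)
            have hRlen := pvInnerA_fst_length fuel (lines.set j (pvDrop4 (lines[j]'h))) (j + 1)
            simp only [List.length_set] at ih2 hRlen
            have hsp : PySem.Str.startswith (lines[j]'h) "    " = true := by
              cases hb : PySem.Str.startswith (lines[j]'h) "    " <;> simp_all
            refine ⟨?_, by omega, ?_, ?_⟩
            · have htj := congrArg (List.take j) ih1
              rw [List.take_take, List.take_take, Nat.min_eq_left (Nat.le_succ j)] at htj
              rw [htj, pvTake_set_self]
            · exact ih3.trans (List.drop_set_of_lt (by omega))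
            · have hdj : lines.drop j = (lines[j]'h) :: lines.drop (j + 1) := (List.getElem_cons_drop h).symm
              have hLd : (lines.set j (pvDrop4 (lines[j]'h))).drop (j + 1) = lines.drop (j + 1) :=
                List.drop_set_of_lt (by omega)
              have hLd2 : (lines.set j (pvDrop4 (lines[j]'h))).drop (pvInnerA fuel (lines.set j (pvDrop4 (lines[j]'h))) (j + 1)).2
                  = lines.drop (pvInnerA fuel (lines.set j (pvDrop4 (lines[j]'h))) (j + 1)).2 :=
                List.drop_set_of_lt (by omega)
              rw [hLd, hLd2] at ih4
              have hRj : j < (pvInnerA fuel (lines.set j (pvDrop4 (lines[j]'h))) (j + 1)).1.length := by omega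
              have hRget : (pvInnerA fuel (lines.set j (pvDrop4 (lines[j]'h))) (j + 1)).1[j]'hRj = pvDrop4 (lines[j]'h) := by
                have h5 : (lines.set j (pvDrop4 (lines[j]'h))).take (j + 1) = lines.take j ++ [pvDrop4 (lines[j]'h)] :=
                  pvTake_succ_set_self _ _ _ h
                have h6 := congrArg (fun xs => xs[j]?) (ih1.trans h5)
                simp only [List.getElem?_take, List.getElem?_append, List.length_take] at h6
                rw [List.getElem?_eq_getElem hRj] at h6
                simp [Nat.min_eq_left (le_of_lt h)] at h6
                exact h6
              have hdropR : (pvInnerA fuel (lines.set j (pvDrop4 (lines[j]'h))) (j + 1)).1.drop j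
                  = pvDrop4 (lines[j]'h) :: (pvInnerA fuel (lines.set j (pvDrop4 (lines[j]'h))) (j + 1)).1.drop (j + 1) := by
                rw [← List.getElem_cons_drop hRj, hRget]
              rw [hdj]
              simp only [pvGoB]
              rw [if_neg h1, if_neg h2, if_pos hsp, hdropR,
                show (pvInnerA fuel (lines.set j (pvDrop4 (lines[j]'h))) (j + 1)).2 - j
                  = ((pvInnerA fuel (lines.set j (pvDrop4 (lines[j]'h))) (j + 1)).2 - (j + 1)) + 1 from by omega,
                List.take_succ_cons, ih4]
              simp
          · have hres : pvInnerA (fuel + 1) lines j = (lines, j) := by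
              simp only [pvInnerA, dif_pos h]
              rw [if_neg h1, if_neg h2, if_neg h3]
            rw [hres]
            have h4 : PySem.Str.startswith (lines[j]'h) "    " = false := by
              have hfence : PySem.Str.startswith (lines[j]'h) "    ```" = false := by
                cases hb : PySem.Str.startswith (lines[j]'h) "    ```" <;> simp_all
              cases hb : PySem.Str.startswith (lines[j]'h) "    " <;> simp_all
            refine ⟨rfl, le_of_lt h, rfl, ?_⟩
            simp only [Nat.sub_self, List.take_zero, List.nil_append]
            rw [← List.getElem_cons_drop h]
            exact pvGoB_break _ _ (Or.inr (Or.inr h4))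
    · have hres : pvInnerA (fuel + 1) lines j = (lines, j) := by
        simp [pvInnerA, h]
      rw [hres]
      refine ⟨rfl, by omega, rfl, ?_⟩
      rw [List.drop_eq_nil_of_le (by omega)]
      simp [pvGoB]

theorem pvOuterA_spec (fuel : Nat) : ∀ (lines : List String) (i : Nat),
    i ≤ lines.length → lines.length - i ≤ fuel →
    pvOuterA fuel lines i = lines.take i ++ pvGoB false (lines.drop i) := by
  induction fuel with
  | zero =>
    intro lines i hi hf
    have hi' : i = lines.length := by omega
    subst hi'
    simp [pvOuterA, pvGoB]
  | succ fuel ih =>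
    intro lines i hi hf
    by_cases h : i < lines.length
    · by_cases hl : PySem.Str.startswith (lines[i]'h) "    #" = true
      · have hres : pvOuterA (fuel + 1) lines i
            = pvOuterA fuel (pvInnerA lines.length (lines.set i (pvDrop4 (lines[i]'h))) (i + 1)).1
                (pvInnerA lines.length (lines.set i (pvDrop4 (lines[i]'h))) (i + 1)).2 := by
          simp only [pvOuterA, dif_pos h]
          rw [if_pos hl]
        rw [hres]
        obtain ⟨s1, s2, s3, s4⟩ := pvInnerA_spec lines.length (lines.set i (pvDrop4 (lines[i]'h))) (i + 1)
          (by simp only [List.length_set]; omega) (by simp only [List.length_set]; omega)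
        have hle := pvInnerA_le_snd lines.length (lines.set i (pvDrop4 (lines[i]'h))) (i + 1)
        have hRlen := pvInnerA_fst_length lines.length (lines.set i (pvDrop4 (lines[i]'h))) (i + 1)
        simp only [List.length_set] at hRlen s2
        rw [List.drop_set_of_lt (show i < i + 1 by omega)] at s4
        rw [List.drop_set_of_lt (show i < (pvInnerA lines.length (lines.set i (pvDrop4 (lines[i]'h))) (i + 1)).2 by omega)] at s3 s4
        rw [ih _ _ (by omega) (by omega)]
        have key : (pvInnerA lines.length (lines.set i (pvDrop4 (lines[i]'h))) (i + 1)).1.take (pvInnerA lines.length (lines.set i (pvDrop4 (lines[i]'h))) (i + 1)).2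
            = lines.take i ++ pvDrop4 (lines[i]'h) :: ((pvInnerA lines.length (lines.set i (pvDrop4 (lines[i]'h))) (i + 1)).1.drop (i + 1)).take ((pvInnerA lines.length (lines.set i (pvDrop4 (lines[i]'h))) (i + 1)).2 - (i + 1)) := by
          conv_lhs => rw [show (pvInnerA lines.length (lines.set i (pvDrop4 (lines[i]'h))) (i + 1)).2 = (i + 1) + ((pvInnerA lines.length (lines.set i (pvDrop4 (lines[i]'h))) (i + 1)).2 - (i + 1)) from by omega]
          rw [List.take_add, s1, pvTake_succ_set_self _ _ _ h]
          simp
        rw [key, s3, ← List.getElem_cons_drop h]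
        simp only [pvGoB]
        rw [if_pos hl, s4]
        simp
      · have hres : pvOuterA (fuel + 1) lines i = pvOuterA fuel lines (i + 1) := by
          simp only [pvOuterA, dif_pos h]
          rw [if_neg hl]
        rw [hres, ih _ _ (by omega) (by omega), ← List.getElem_cons_drop h]
        simp only [pvGoB]
        rw [if_neg hl, List.take_succ_eq_append_getElem h, List.append_assoc]
        rfl
    · have hi' : i = lines.length := by omega
      subst hi'
      simp [pvOuterA, pvGoB]

-- a line starting with '!!! ' or '#' does not start with '    '
theorem pvBreak_not_indent (l : String)
    (h : (PySem.Str.startswith l "!!! " || PySem.Str.startswith l "#") = true) :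
    PySem.Str.startswith l "    " = false := by
  by_contra hne
  have hs : PySem.Str.startswith l "    " = true := by
    cases hb : PySem.Str.startswith l "    " <;> simp_all
  obtain ⟨t, ht⟩ := pvPrefix_decomp l "    " hs
  rcases Bool.or_eq_true_iff.mp h with h1 | h1 <;>
    · obtain ⟨u, hu⟩ := pvPrefix_decomp l _ h1
      rw [ht] at hu
      simp at hu

-- A's recursion equals B's flag-then-dedent staging
theorem pvFlagsB_false_cons (l : String) (rest : List String) :
    pvFlagsB false (l :: rest)
      = (PySem.Str.startswith l "    #") :: pvFlagsB (PySem.Str.startswith l "    #") rest := rfl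

theorem pvFlagsB_true_cons (l : String) (rest : List String) :
    pvFlagsB true (l :: rest) = pvDedentable l :: pvFlagsB (pvDedentable l) rest := rfl

theorem pvGoB_eq_zip (prev : Bool) (lines : List String) :
    pvGoB prev lines
      = List.zipWith (fun l f => if f then pvDrop4 l else l) lines (pvFlagsB prev lines) := by
  induction lines generalizing prev with
  | nil => cases prev <;> rfl
  | cons l rest ih =>
    cases prev with
    | false =>
      rw [pvFlagsB_false_cons]
      by_cases hl : PySem.Str.startswith l "    #" = true
      · simp only [pvGoB]
        rw [if_pos hl, hl, List.zipWith_cons_cons, ih true]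
        simp
      · simp only [pvGoB]
        rw [if_neg hl]
        rw [Bool.not_eq_true] at hl
        rw [hl, List.zipWith_cons_cons, ih false]
        simp
    | true =>
      rw [pvFlagsB_true_cons]
      simp only [pvGoB]
      by_cases h1 : PySem.Str.strip l = ""
      · have hd : pvDedentable l = false := by
          unfold pvDedentable
          rw [h1]
          simp
        rw [if_pos h1, hd, List.zipWith_cons_cons, ih false]
        simp
      · rw [if_neg h1]
        by_cases h2 : (PySem.Str.startswith l "!!! " || PySem.Str.startswith l "#" || PySem.Str.startswith l "    ```") = true
        · have hd : pvDedentable l = false := by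
            rcases Bool.or_eq_true_iff.mp h2 with h3 | h3
            · unfold pvDedentable
              rw [pvBreak_not_indent l h3]
              simp
            · unfold pvDedentable
              rw [h3]
              simp
          rw [if_pos h2, hd, List.zipWith_cons_cons, ih false]
          simp
        · rw [if_neg h2]
          have hfence : PySem.Str.startswith l "    ```" = false := by
            cases hb : PySem.Str.startswith l "    ```"
            · rfl
            · exact absurd (by rw [hb]; simp) h2
          by_cases h3 : PySem.Str.startswith l "    " = true
          · have hd : pvDedentable l = true := by
              unfold pvDedentable
              have hstr : (PySem.Str.strip l == "") = false := beq_eq_false_iff_ne.mpr h1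
              rw [h3, hfence, hstr]
              rfl
            rw [if_pos h3, hd, List.zipWith_cons_cons, ih true]
            simp
          · have hd : pvDedentable l = false := by
              unfold pvDedentable
              rw [Bool.not_eq_true] at h3
              rw [h3]
              simp
            rw [if_neg h3, hd, List.zipWith_cons_cons, ih false]
            simp

-- ===== VERDICT (by name: the statement is the Claim_ definition above) =====
theorem normalize_headings_outside_admonitions_spec : Claim_equal_normalize_headings_outside_admonitions := by
  intro text _
  unfold Spec_normalize_headings_outside_admonitions
  unfold normalize_headings_outside_admonitions normalize_headings_outside_admonitions_alt
  rw [pvOuterA_spec _ _ 0 (Nat.zero_le _) (by omega), pvGoB_eq_zip]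
  simp
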